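-- pv_equiv track=rewrite | github.com/micheloosterhof/aldegonde | aldegonde/lib.py | ciphertext_autokey_oddvig_encrypt
-- ===== SOURCE A (Python) =====
-- MAX = 29
--
-- def ciphertext_autokey_oddvig_encrypt(
--     plaintext: list[int], primer: list[int] = [0]
-- ) -> list[int]:
--     """
--     2Vig primitive without any console output, C=P+K1+K
--     """
--     key: list[int] = primer.copy()
--     output: list[int] = []
--     for j in range(0, len(plaintext)):
--         if j % 2 == 0:
--             c = (plaintext[j] + key[j]) % MAX
--         else:
--             c = (plaintext[j] - key[j]) % MAX
--         output.append(c)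
--         key.append(c)
--     return output
-- ===== SOURCE B (Python) =====
-- MAX = 29
--
-- def ciphertext_autokey_oddvig_encrypt(
--     plaintext: list[int], primer: list[int] = [0]
-- ) -> list[int]:
--     """Chain-wise computation: each residue class mod len(primer) is an independent
--     autokey chain, walked with an unreduced accumulator (congruence mod MAX)."""
--     n = len(plaintext)
--     p = len(primer)
--     out = [0] * n
--     for r in range(p):
--         acc = primer[r]
--         j = r
--         while j < n:
--             acc = plaintext[j] + acc if j % 2 == 0 else plaintext[j] - acc
--             out[j] = acc % MAX
--             j += p
--     return out
-- ===== Notes on version B (the rewrite author's own statement) =====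
-- stated objective: alternative
-- what changed: B replaces A's single sequential pass with its growing combined key buffer by independent walks of each residue-class chain mod len(primer) over a preallocated output array, carrying an unreduced accumulator that is only congruent mod 29 to A's key (correct because +/- preserve congruence).
import Mathlib
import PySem

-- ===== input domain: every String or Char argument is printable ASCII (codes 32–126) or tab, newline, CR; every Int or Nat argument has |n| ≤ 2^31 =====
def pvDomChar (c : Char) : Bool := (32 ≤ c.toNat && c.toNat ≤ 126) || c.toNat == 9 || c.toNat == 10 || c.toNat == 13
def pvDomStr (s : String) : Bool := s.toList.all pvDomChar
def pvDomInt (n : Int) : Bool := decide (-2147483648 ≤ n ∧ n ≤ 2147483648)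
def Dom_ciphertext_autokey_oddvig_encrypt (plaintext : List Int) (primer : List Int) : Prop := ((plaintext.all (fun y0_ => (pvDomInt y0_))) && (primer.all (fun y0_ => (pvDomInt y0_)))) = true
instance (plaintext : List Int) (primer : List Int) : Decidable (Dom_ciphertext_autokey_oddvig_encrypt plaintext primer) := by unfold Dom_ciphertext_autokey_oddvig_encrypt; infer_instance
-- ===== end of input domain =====

-- B replaces A's single sequential pass with combined key buffer by an independent walk of each
-- residue-class chain mod len(primer) over a preallocated output, carrying an unreduced
-- accumulator (correct because ± preserves congruence mod 29); objective: alternative.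

-- ===== PORT A =====
-- A: one loop, state (key, output); key starts as a copy of primer and every ciphertext is appended to it.
def ciphertext_autokey_oddvig_encrypt (plaintext : List Int) (primer : List Int) : List Int :=
  ((List.range plaintext.length).foldl
    (fun (st : List Int × List Int) (j : Nat) =>
      let key := st.1
      let output := st.2
      let c :=
        if j % 2 == 0 then
          PySem.Int.mod (PySem.List.pyGetD plaintext (j : Int) 0 + PySem.List.pyGetD key (j : Int) 0) 29
        else
          PySem.Int.mod (PySem.List.pyGetD plaintext (j : Int) 0 - PySem.List.pyGetD key (j : Int) 0) 29
      (key ++ [c], output ++ [c]))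
    (primer, ([] : List Int))).2

-- ===== PORT B =====
-- B's inner while loop: walk indices j, j+p, ... < n, writing into the preallocated output.
-- fuel bounds the iteration count (the loop runs at most n times); it only guards totality.
def pvChain (plaintext : List Int) (p n : Nat) (fuel : Nat) (j : Nat) (acc : Int) (out : List Int) : List Int :=
  match fuel with
  | 0 => out
  | f + 1 =>
    if j < n then
      let acc' := if j % 2 == 0 then PySem.List.pyGetD plaintext (j : Int) 0 + acc
                  else PySem.List.pyGetD plaintext (j : Int) 0 - acc
      pvChain plaintext p n f (j + p) acc' (out.set j (PySem.Int.mod acc' 29))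
    else out

-- B: preallocated output; one independent chain per residue class r of len(primer).
def ciphertext_autokey_oddvig_encrypt_alt (plaintext : List Int) (primer : List Int) : List Int :=
  let n := plaintext.length
  let p := primer.length
  (List.range p).foldl
    (fun out r => pvChain plaintext p n n r (PySem.List.pyGetD primer (r : Int) 0) out)
    (List.replicate n 0)

-- ===== PRECONDITION & SPEC =====
-- Pre_ excludes exactly the inputs where the Python A raises IndexError (empty primer with
-- nonempty plaintext, where the first key lookup is out of range).
def Pre_ciphertext_autokey_oddvig_encrypt (plaintext : List Int) (primer : List Int) : Prop :=
  primer ≠ [] ∨ plaintext = []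
instance (plaintext : List Int) (primer : List Int) : Decidable (Pre_ciphertext_autokey_oddvig_encrypt plaintext primer) := by unfold Pre_ciphertext_autokey_oddvig_encrypt; infer_instance

def pvWitness_ciphertext_autokey_oddvig_encrypt : List Int × List Int := ([3, 4, 5], [1])

def Spec_ciphertext_autokey_oddvig_encrypt (plaintext : List Int) (primer : List Int) (out : List Int) : Prop := out = ciphertext_autokey_oddvig_encrypt_alt plaintext primer
instance (plaintext : List Int) (primer : List Int) (out : List Int) : Decidable (Spec_ciphertext_autokey_oddvig_encrypt plaintext primer out) := by unfold Spec_ciphertext_autokey_oddvig_encrypt; infer_instance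

-- ===== CLAIM (what is proved, stated in full; the proofs are below) =====
def Claim_equal_ciphertext_autokey_oddvig_encrypt : Prop := ∀ (plaintext : List Int) (primer : List Int), Dom_ciphertext_autokey_oddvig_encrypt plaintext primer → Pre_ciphertext_autokey_oddvig_encrypt plaintext primer → Spec_ciphertext_autokey_oddvig_encrypt plaintext primer (ciphertext_autokey_oddvig_encrypt plaintext primer)

-- ===== LEMMAS AND PROOFS =====

-- A's step: the ciphertext at position j given the ciphertexts 'out' produced so far.
def pvStep (plaintext primer out : List Int) (j : Nat) : Int :=
  if j % 2 == 0 then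
    PySem.Int.mod (PySem.List.pyGetD plaintext (j : Int) 0 + PySem.List.pyGetD (primer ++ out) (j : Int) 0) 29
  else
    PySem.Int.mod (PySem.List.pyGetD plaintext (j : Int) 0 - PySem.List.pyGetD (primer ++ out) (j : Int) 0) 29

def pvSteps (plaintext primer : List Int) : Nat → List Int
  | 0 => []
  | k + 1 => pvSteps plaintext primer k ++ [pvStep plaintext primer (pvSteps plaintext primer k) k]

-- the j-th ciphertext value
def pvC (plaintext primer : List Int) (j : Nat) : Int :=
  pvStep plaintext primer (pvSteps plaintext primer j) j

theorem pvSteps_length (pt pr : List Int) (k : Nat) : (pvSteps pt pr k).length = k := by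
  induction k with
  | zero => rfl
  | succ k ih => simp [pvSteps, ih]

theorem pvSteps_getElem? (pt pr : List Int) (k j : Nat) (h : j < k) :
    (pvSteps pt pr k)[j]? = some (pvC pt pr j) := by
  induction k with
  | zero => omega
  | succ k ih =>
    rcases Nat.lt_or_ge j k with hk | hk
    · rw [pvSteps, List.getElem?_append_left (by rw [pvSteps_length]; exact hk)]
      exact ih hk
    · have hj : j = k := by omega
      subst hj
      rw [pvSteps, List.getElem?_append_right (by rw [pvSteps_length])]
      simp [pvSteps_length, pvC]

theorem a_fold_eq (plaintext primer : List Int) (k : Nat) :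
    (List.range k).foldl
      (fun (st : List Int × List Int) (j : Nat) =>
        let key := st.1
        let output := st.2
        let c :=
          if j % 2 == 0 then
            PySem.Int.mod (PySem.List.pyGetD plaintext (j : Int) 0 + PySem.List.pyGetD key (j : Int) 0) 29
          else
            PySem.Int.mod (PySem.List.pyGetD plaintext (j : Int) 0 - PySem.List.pyGetD key (j : Int) 0) 29
        (key ++ [c], output ++ [c]))
      (primer, ([] : List Int))
    = (primer ++ pvSteps plaintext primer k, pvSteps plaintext primer k) := by
  induction k with
  | zero => simp [pvSteps]
  | succ k ih =>
    rw [List.range_succ, List.foldl_append, ih]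
    simp [pvSteps, pvStep]

theorem a_eq_steps (plaintext primer : List Int) :
    ciphertext_autokey_oddvig_encrypt plaintext primer
      = pvSteps plaintext primer plaintext.length := by
  unfold ciphertext_autokey_oddvig_encrypt
  rw [a_fold_eq]

-- A's key value at position j (as read through pyGetD, default 0)
def pvKey (pt pr : List Int) (j : Nat) : Int :=
  PySem.List.pyGetD (pr ++ pvSteps pt pr j) (j : Int) 0

theorem pvKey_lt (pt pr : List Int) (j : Nat) (h : j < pr.length) :
    pvKey pt pr j = PySem.List.pyGetD pr (j : Int) 0 := by
  unfold pvKey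
  rw [PySem.List.pyGetD_natCast, PySem.List.pyGetD_natCast]
  unfold List.getD
  rw [List.getElem?_append_left h]

theorem pvKey_ge (pt pr : List Int) (j : Nat) (hp : 0 < pr.length) (h : pr.length ≤ j) :
    pvKey pt pr j = pvC pt pr (j - pr.length) := by
  unfold pvKey
  rw [PySem.List.pyGetD_natCast]
  unfold List.getD
  rw [List.getElem?_append_right h, pvSteps_getElem? pt pr j (j - pr.length) (by omega)]
  rfl

-- congruence step: the writing value equals A's ciphertext when acc ≡ key (mod 29)
theorem step_congr (pt pr : List Int) (j : Nat) (acc : Int)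
    (hacc : acc % 29 = pvKey pt pr j % 29) :
    PySem.Int.mod (if j % 2 == 0 then PySem.List.pyGetD pt (j : Int) 0 + acc
                   else PySem.List.pyGetD pt (j : Int) 0 - acc) 29
      = pvC pt pr j := by
  unfold pvKey at hacc
  unfold pvC pvStep
  simp only [PySem.Int.mod_eq_emod_of_pos (show (0:Int) < 29 by norm_num)]
  split
  · rw [Int.add_emod, hacc, ← Int.add_emod]
  · rw [Int.sub_emod, hacc, ← Int.sub_emod]

theorem pvChain_length (pt : List Int) (p : Nat) :
    ∀ (fuel j : Nat) (acc : Int) (out : List Int),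
    (pvChain pt p pt.length fuel j acc out).length = out.length := by
  intro fuel
  induction fuel with
  | zero => intro j acc out; rfl
  | succ f ih =>
    intro j acc out
    unfold pvChain
    split
    · rw [ih]; simp
    · rfl

theorem pvChain_spec (pt pr : List Int) (hp : 0 < pr.length) :
    ∀ (fuel j : Nat) (acc : Int) (out : List Int),
    out.length = pt.length →
    pt.length ≤ j + fuel →
    acc % 29 = pvKey pt pr j % 29 →
    ∀ i, i < pt.length →
      (pvChain pt pr.length pt.length fuel j acc out)[i]? =
        if j ≤ i ∧ pr.length ∣ (i - j) then some (pvC pt pr i) else out[i]? := by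
  intro fuel
  induction fuel with
  | zero =>
    intro j acc out hlen hfu hacc i hi
    have : ¬ (j ≤ i ∧ pr.length ∣ (i - j)) := by rintro ⟨h1, _⟩; omega
    simp [pvChain, this]
  | succ f ih =>
    intro j acc out hlen hfu hacc i hi
    unfold pvChain
    split
    · -- j < pt.length
      rename_i hjn
      set acc' := if j % 2 == 0 then PySem.List.pyGetD pt (j : Int) 0 + acc
                  else PySem.List.pyGetD pt (j : Int) 0 - acc with hacc'
      have hwrite : PySem.Int.mod acc' 29 = pvC pt pr j := step_congr pt pr j acc hacc
      have hacc2 : acc' % 29 = pvKey pt pr (j + pr.length) % 29 := by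
        rw [pvKey_ge pt pr (j + pr.length) hp (by omega)]
        have : j + pr.length - pr.length = j := by omega
        rw [this, ← hwrite, PySem.Int.mod_eq_emod_of_pos (by norm_num),
            Int.emod_emod_of_dvd _ dvd_rfl]
      rw [ih (j + pr.length) acc' (out.set j (PySem.Int.mod acc' 29))
          (by simp [hlen]) (by omega) hacc2 i hi]
      rw [hwrite]
      by_cases hij : i = j
      · subst hij
        have h1 : ¬ (i + pr.length ≤ i ∧ pr.length ∣ (i - (i + pr.length))) := by
          rintro ⟨h, _⟩; omega
        have h2 : i ≤ i ∧ pr.length ∣ (i - i) := ⟨le_refl i, by simp⟩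
        rw [if_neg h1, List.getElem?_set_self (by omega), if_pos h2]
      · have hcond : (j + pr.length ≤ i ∧ pr.length ∣ (i - (j + pr.length))) ↔
            (j ≤ i ∧ pr.length ∣ (i - j)) := by
          constructor
          · rintro ⟨h1, t, ht⟩
            have he : pr.length * (t + 1) = pr.length * t + pr.length := by ring
            exact ⟨by omega, t + 1, by omega⟩
          · rintro ⟨h1, t, ht⟩
            have ht0 : 0 < t := by
              rcases Nat.eq_zero_or_pos t with h0 | h0
              · subst h0; simp at ht; omega
              · exact h0
            have he : pr.length * t = pr.length * (t - 1) + pr.length := by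
              calc pr.length * t = pr.length * ((t - 1) + 1) := by
                    rw [Nat.sub_add_cancel ht0]
                _ = pr.length * (t - 1) + pr.length := by ring
            exact ⟨by omega, t - 1, by omega⟩
        rw [List.getElem?_set_ne (by omega)]
        by_cases hc : j ≤ i ∧ pr.length ∣ (i - j)
        · rw [if_pos hc, if_pos (hcond.mpr hc)]
        · rw [if_neg hc, if_neg (fun h => hc (hcond.mp h))]
    · -- pt.length ≤ j
      rename_i hjn
      have : ¬ (j ≤ i ∧ pr.length ∣ (i - j)) := by rintro ⟨h1, _⟩; omega
      rw [if_neg this]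

theorem b_fold_length (pt pr : List Int) (m : Nat) :
    ((List.range m).foldl
      (fun out r => pvChain pt pr.length pt.length pt.length r (PySem.List.pyGetD pr (r : Int) 0) out)
      (List.replicate pt.length 0)).length = pt.length := by
  induction m with
  | zero => simp
  | succ k ihk =>
    rw [List.range_succ, List.foldl_append, List.foldl_cons, List.foldl_nil,
        pvChain_length, ihk]

-- outer fold invariant over the residue classes
theorem b_fold_spec (pt pr : List Int) (hp : 0 < pr.length) :
    ∀ (m : Nat), m ≤ pr.length →
    ∀ i, i < pt.length →
      ((List.range m).foldl
        (fun out r => pvChain pt pr.length pt.length pt.length r (PySem.List.pyGetD pr (r : Int) 0) out)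
        (List.replicate pt.length 0))[i]? =
      if i % pr.length < m then some (pvC pt pr i) else some 0 := by
  intro m
  induction m with
  | zero =>
    intro _ i hi
    simp [hi]
  | succ m ih =>
    intro hm i hi
    rw [List.range_succ, List.foldl_append, List.foldl_cons, List.foldl_nil]
    have hlen := b_fold_length pt pr m
    have haccm : PySem.List.pyGetD pr (m : Int) 0 % 29 = pvKey pt pr m % 29 := by
      rw [pvKey_lt pt pr m (by omega)]
    rw [pvChain_spec pt pr hp pt.length m _ _ hlen (by omega) haccm i hi]
    have hmod : (m ≤ i ∧ pr.length ∣ (i - m)) ↔ i % pr.length = m := by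
      constructor
      · rintro ⟨h1, t, ht⟩
        have hi2 : i = m + pr.length * t := by omega
        rw [hi2, Nat.add_mul_mod_self_left]
        exact Nat.mod_eq_of_lt (by omega)
      · intro h
        refine ⟨h ▸ Nat.mod_le i pr.length, i / pr.length, ?_⟩
        conv_lhs => rw [← Nat.div_add_mod i pr.length, h]
        omega
    by_cases hc : i % pr.length = m
    · rw [if_pos (hmod.mpr hc), if_pos (by omega)]
    · rw [if_neg (fun h => hc (hmod.mp h)), ih (by omega) i hi]
      have : i % pr.length < m + 1 ↔ i % pr.length < m := by omega
      rw [if_congr this rfl rfl]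

-- ===== VERDICT (by name: the statement is the Claim_ definition above) =====
theorem ciphertext_autokey_oddvig_encrypt_spec : Claim_equal_ciphertext_autokey_oddvig_encrypt := by
  intro pt pr _ hpre
  unfold Spec_ciphertext_autokey_oddvig_encrypt
  rcases hpre with hp | hn
  · have hp : 0 < pr.length := List.length_pos_iff.mpr hp
    unfold ciphertext_autokey_oddvig_encrypt_alt
    rw [a_eq_steps]
    apply List.ext_getElem?
    intro i
    by_cases hi : i < pt.length
    · rw [pvSteps_getElem? pt pr pt.length i hi,
          b_fold_spec pt pr hp pr.length (le_refl _) i hi,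
          if_pos (Nat.mod_lt i hp)]
    · rw [List.getElem?_eq_none (by rw [pvSteps_length]; omega),
          List.getElem?_eq_none]
      rw [b_fold_length]; omega
  · subst hn
    rw [a_eq_steps]
    have h2 := b_fold_length [] pr pr.length
    simp only [List.length_nil] at h2
    exact (List.length_eq_zero_iff.mp h2).symm
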